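-- pv_equiv track=rewrite | github.com/isma178/foobar | salute/solution.py | solution
-- ===== SOURCE A (Python) =====
-- def solution(s):
--     hallway = list(s)
--     counter = 0
--     lefts = 0
--     for x, y in enumerate(hallway):
--         if y == ">":
--             hallway[0:x] = [0]*x
--             lefts = hallway.count("<")
--             counter += lefts
--     return counter*2
-- ===== SOURCE B (Python) =====
-- def solution(s):
--     # one pass: for each '<', add the number of '>' already seen; result doubled
--     rights = 0
--     total = 0
--     for c in s:
--         if c == ">":
--             rights += 1
--         elif c == "<":
--             total += rights
--     return total * 2
-- ===== Notes on version B (the rewrite author's own statement) =====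
-- stated objective: alternative
-- what changed: Replaced the rescan approach (slice-assign zeros then recount the remaining left-walkers at every right-walker) by a single left-to-right pass that keeps a running count of right-walkers and adds it at each left-walker.
import Mathlib
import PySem

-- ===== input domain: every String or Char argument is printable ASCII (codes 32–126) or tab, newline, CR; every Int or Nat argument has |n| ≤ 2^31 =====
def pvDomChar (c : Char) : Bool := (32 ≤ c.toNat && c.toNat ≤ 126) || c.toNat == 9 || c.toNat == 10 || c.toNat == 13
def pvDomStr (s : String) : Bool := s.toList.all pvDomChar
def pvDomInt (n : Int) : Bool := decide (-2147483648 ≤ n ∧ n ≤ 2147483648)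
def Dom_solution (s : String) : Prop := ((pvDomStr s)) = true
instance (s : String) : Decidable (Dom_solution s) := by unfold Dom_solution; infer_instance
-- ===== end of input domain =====

-- B replaces A's rescan-per-right-walker approach with a single pass keeping a running count of right-walkers (alternative algorithm; not measured faster).


-- ===== PORT A =====
-- loop body of A; hallway is List (Option Char): `some c` is an original char, `none` is the 0 written by `hallway[0:x] = [0]*x`
def stepA (st : List (Option Char) × Int) (xy : Int × Option Char) : List (Option Char) × Int :=
  if xy.2 = some '>' then
    -- hand-port of slice assignment hallway[0:x] = [0]*x (x = enumerate index, always ≥ 0, so toNat is exact)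
    let h := List.replicate xy.1.toNat (none : Option Char) ++ st.1.drop xy.1.toNat
    let lefts : Int := (h.count (some '<') : Nat)
    (h, st.2 + lefts)
  else st

def solution (s : String) : Int :=
  let hallway : List (Option Char) := s.toList.map Option.some
  let st := (PySem.List.enumerate hallway 0).foldl stepA (hallway, 0)
  st.2 * 2

-- ===== PORT B =====
-- loop body of B; state = (rights, total)
def stepB (st : Int × Int) (c : Char) : Int × Int :=
  if c = '>' then (st.1 + 1, st.2)
  else if c = '<' then (st.1, st.2 + st.1)
  else st

def solution_alt (s : String) : Int :=
  let st := s.toList.foldl stepB (0, 0)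
  st.2 * 2

-- ===== PRECONDITION & SPEC =====
def Spec_solution (s : String) (out : Int) : Prop := out = solution_alt s
instance (s : String) (out : Int) : Decidable (Spec_solution s out) := by unfold Spec_solution; infer_instance

-- ===== CLAIM (what is proved, stated in full; the proofs are below) =====
def Claim_equal_solution : Prop := ∀ (s : String), Dom_solution s → Spec_solution s (solution s)

-- ===== LEMMAS AND PROOFS =====

-- the common value: for each '>' the number of '<' strictly to its right
def pairCount : List Char → Int
  | [] => 0
  | c :: t => (if c = '>' then (t.count '<' : Nat) else 0) + pairCount t

theorem foldA_eq (t : List Char) : ∀ (i : Nat) (h : List (Option Char)) (c : Int),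
    h.drop i = t.map Option.some →
    ((PySem.List.enumerate (t.map Option.some) (i : Int)).foldl stepA (h, c)).2 = c + pairCount t := by
  induction t with
  | nil => intro i h c _; simp [PySem.List.enumerate_nil, pairCount]
  | cons y r ih =>
    intro i h c hdrop
    simp only [List.map_cons, PySem.List.enumerate_cons, List.foldl_cons]
    by_cases hy : y = '>'
    · subst hy
      have hx : ((i : Int) + 1) = ((i + 1 : Nat) : Int) := by push_cast; ring
      rw [hx]
      have htoNat : (i : Int).toNat = i := Int.toNat_natCast i
      simp only [stepA, htoNat, if_true]
      set h' := List.replicate i (none : Option Char) ++ h.drop i with hh'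
      have hdl : h'.drop i = List.map Option.some ('>' :: r) := by
        rw [hh']
        have hl : (List.replicate i (none : Option Char) ++ h.drop i).drop i
            = h.drop i := by simp
        rw [hl, hdrop]
      have hdrop' : h'.drop (i + 1) = r.map Option.some := by
        have hdd : h'.drop (i + 1) = (h'.drop i).drop 1 := by rw [List.drop_drop]
        rw [hdd, hdl]
        simp
      have hcount : (h'.count (some '<') : Int) = (r.count '<' : Nat) := by
        rw [hh', List.count_append, hdrop, List.count_replicate]
        simp only [List.map_cons, List.count_cons]
        have : ((some '<' : Option Char) = some '>') = False := by simp
        rw [List.count_map_of_injective r Option.some (Option.some_injective Char)]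
        simp
      rw [ih (i + 1) h' (c + (h'.count (some '<') : Nat)) hdrop']
      rw [pairCount]
      have : ((h'.count (some '<') : Nat) : Int) = (r.count '<' : Nat) := hcount
      rw [this]
      simp only [if_true]
      ring
    · have hy' : (some y = some '>') = False := by simp [hy]
      have hx : ((i : Int) + 1) = ((i + 1 : Nat) : Int) := by push_cast; ring
      rw [hx]
      simp only [stepA, hy', if_false]
      have hdrop' : h.drop (i + 1) = r.map Option.some := by
        have : h.drop (i + 1) = (h.drop i).drop 1 := by
          rw [List.drop_drop]
        rw [this, hdrop]
        simp
      rw [ih (i + 1) h c hdrop']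
      simp [pairCount, hy]

theorem foldB_eq (t : List Char) : ∀ (g c : Int),
    (t.foldl stepB (g, c)).2 = c + g * (t.count '<' : Nat) + pairCount t := by
  induction t with
  | nil => intro g c; simp [pairCount]
  | cons y r ih =>
    intro g c
    simp only [List.foldl_cons]
    by_cases h1 : y = '>'
    · subst h1
      simp only [stepB, if_true]
      rw [ih]
      simp [pairCount]
      ring
    · by_cases h2 : y = '<'
      · subst h2
        rw [show stepB (g, c) '<' = (g, c + g) from by simp [stepB]]
        rw [ih]
        simp [pairCount, h1]
        ring
      · simp only [stepB, if_neg h1, if_neg h2]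
        rw [ih]
        simp [pairCount, h1, h2]

-- ===== VERDICT (by name: the statement is the Claim_ definition above) =====
theorem solution_spec : Claim_equal_solution := by
  intro s _
  unfold Spec_solution solution solution_alt
  have hA := foldA_eq s.toList 0 (s.toList.map Option.some) 0 (by simp)
  have hB := foldB_eq s.toList 0 0
  simp only [Nat.cast_zero] at hA
  simp [hA, hB]
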